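-- pv_equiv track=rewrite | github.com/ak2k2/Checkers-Alpha-Beta-AI | src/clean.py | coords_to_bitindex
-- ===== SOURCE A (Python) =====
-- def coords_to_bitindex(coords):
--     map = {
--         0: "A1",
--         1: "C1",
--         2: "E1",
--         3: "G1",
--         4: "B2",
--         5: "D2",
--         6: "F2",
--         7: "H2",
--         8: "A3",
--         9: "C3",
--         10: "E3",
--         11: "G3",
--         12: "B4",
--         13: "D4",
--         14: "F4",
--         15: "H4",
--         16: "A5",
--         17: "C5",
--         18: "E5",
--         19: "G5",
--         20: "B6",
--         21: "D6",
--         22: "F6",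
--         23: "H6",
--         24: "A7",
--         25: "C7",
--         26: "E7",
--         27: "G7",
--         28: "B8",
--         29: "D8",
--         30: "F8",
--         31: "H8",
--     }
--
--     for key, value in map.items():
--         if value == coords:
--             return key
-- ===== SOURCE B (Python) =====
-- def coords_to_bitindex(coords):
--     # Closed-form decode of the 32 playable checkers squares; None for anything else.
--     if len(coords) != 2:
--         return None
--     c = ord(coords[0]) - ord("A")
--     r = ord(coords[1]) - ord("1")
--     if not (0 <= c < 8 and 0 <= r < 8):
--         return None
--     if c % 2 != r % 2:
--         return None
--     return r * 4 + c // 2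
-- ===== Notes on version B (the rewrite author's own statement) =====
-- stated objective: simpler
-- what changed: Replaces the 32-entry dict literal and linear scan with a closed-form arithmetic decode (validate shape, ord arithmetic, parity check, r*4 + c//2).
import Mathlib
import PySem

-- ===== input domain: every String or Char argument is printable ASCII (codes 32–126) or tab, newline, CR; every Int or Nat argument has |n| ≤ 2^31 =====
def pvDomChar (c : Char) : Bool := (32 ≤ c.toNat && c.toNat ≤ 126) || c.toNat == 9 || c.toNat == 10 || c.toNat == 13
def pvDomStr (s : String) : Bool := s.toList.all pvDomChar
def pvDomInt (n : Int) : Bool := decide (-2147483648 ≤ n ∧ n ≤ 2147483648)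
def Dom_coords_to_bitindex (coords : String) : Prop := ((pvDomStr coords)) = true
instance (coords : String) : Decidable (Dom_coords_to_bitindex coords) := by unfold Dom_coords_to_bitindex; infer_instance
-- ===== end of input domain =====

-- B replaces A's 32-entry dict and linear scan by a closed-form arithmetic decode (objective: simpler).

-- ===== PORT A =====
-- the dict literal's items in insertion order (all keys distinct)
def cbMap : List (Int × String) :=
  [(0, "A1"), (1, "C1"), (2, "E1"), (3, "G1"),
   (4, "B2"), (5, "D2"), (6, "F2"), (7, "H2"),
   (8, "A3"), (9, "C3"), (10, "E3"), (11, "G3"),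
   (12, "B4"), (13, "D4"), (14, "F4"), (15, "H4"),
   (16, "A5"), (17, "C5"), (18, "E5"), (19, "G5"),
   (20, "B6"), (21, "D6"), (22, "F6"), (23, "H6"),
   (24, "A7"), (25, "C7"), (26, "E7"), (27, "G7"),
   (28, "B8"), (29, "D8"), (30, "F8"), (31, "H8")]

-- the 'for key, value in map.items(): if value == coords: return key' loop (falls off the end → None)
def cbLoop (items : List (Int × String)) (coords : String) : Option Int :=
  match items with
  | [] => none
  | (k, v) :: rest => if v == coords then some k else cbLoop rest coords

def coords_to_bitindex (coords : String) : Option Int :=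
  cbLoop cbMap coords

-- ===== PORT B =====
def coords_to_bitindex_alt (coords : String) : Option Int :=
  match coords.toList with
  | [col, row] =>
      let c : Int := (col.toNat : Int) - 65
      let r : Int := (row.toNat : Int) - 49
      if 0 ≤ c ∧ c < 8 ∧ 0 ≤ r ∧ r < 8 then
        if PySem.Int.mod c 2 = PySem.Int.mod r 2 then
          some (r * 4 + PySem.Int.floordiv c 2)
        else none
      else none
  | _ => none

-- ===== PRECONDITION & SPEC =====
def Spec_coords_to_bitindex (coords : String) (out : Option Int) : Prop := out = coords_to_bitindex_alt coords
instance (coords : String) (out : Option Int) : Decidable (Spec_coords_to_bitindex coords out) := by unfold Spec_coords_to_bitindex; infer_instance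

-- ===== CLAIM (what is proved, stated in full; the proofs are below) =====
def Claim_equal_coords_to_bitindex : Prop := ∀ (coords : String), Dom_coords_to_bitindex coords → Spec_coords_to_bitindex coords (coords_to_bitindex coords)

-- ===== LEMMAS AND PROOFS =====

lemma cb_col_cases (c : Char) (h1 : 65 ≤ c.toNat) (h2 : c.toNat ≤ 72) :
    c = 'A' ∨ c = 'B' ∨ c = 'C' ∨ c = 'D' ∨ c = 'E' ∨ c = 'F' ∨ c = 'G' ∨ c = 'H' := by
  have h0 : c = Char.ofNat c.toNat := (Char.ofNat_toNat c).symm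
  interval_cases hx : c.toNat <;> (rw [h0]; decide)

lemma cb_row_cases (r : Char) (h1 : 49 ≤ r.toNat) (h2 : r.toNat ≤ 56) :
    r = '1' ∨ r = '2' ∨ r = '3' ∨ r = '4' ∨ r = '5' ∨ r = '6' ∨ r = '7' ∨ r = '8' := by
  have h0 : r = Char.ofNat r.toNat := (Char.ofNat_toNat r).symm
  interval_cases hx : r.toNat <;> (rw [h0]; decide)

lemma cbLoop_eq_none (items : List (Int × String)) (coords : String)
    (h : ∀ p ∈ items, ¬ p.2 = coords) : cbLoop items coords = none := by
  induction items with
  | nil => rfl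
  | cons p rest ih =>
      obtain ⟨k, v⟩ := p
      have hv : ¬ v = coords := h (k, v) (List.mem_cons_self)
      simp only [cbLoop, beq_iff_eq, if_neg hv]
      exact ih (fun q hq => h q (List.mem_cons_of_mem _ hq))

lemma cb_pair (coords : String) (c r : Char) (h : coords.toList = [c, r]) :
    coords_to_bitindex coords = coords_to_bitindex_alt coords := by
  by_cases hin : 65 ≤ c.toNat ∧ c.toNat ≤ 72 ∧ 49 ≤ r.toNat ∧ r.toNat ≤ 56
  · obtain ⟨h1, h2, h3, h4⟩ := hin
    have hcoords : coords = String.ofList [c, r] := by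
      apply String.toList_inj.mp; rw [h]; simp
    subst hcoords
    rcases cb_col_cases c h1 h2 with rfl | rfl | rfl | rfl | rfl | rfl | rfl | rfl <;>
      rcases cb_row_cases r h3 h4 with rfl | rfl | rfl | rfl | rfl | rfl | rfl | rfl <;>
      decide
  · have ha : coords_to_bitindex coords = none := by
      apply cbLoop_eq_none
      intro p hp
      fin_cases hp <;>
        (intro hEq
         have ht := congrArg String.toList hEq
         rw [h] at ht
         simp at ht
         obtain ⟨hc, hr⟩ := ht
         subst hc; subst hr
         exact hin (by decide))
    have hb : coords_to_bitindex_alt coords = none := by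
      unfold coords_to_bitindex_alt
      rw [h]
      have hcond : ¬ (0 ≤ ((c.toNat : Int) - 65) ∧ ((c.toNat : Int) - 65) < 8 ∧
          0 ≤ ((r.toNat : Int) - 49) ∧ ((r.toNat : Int) - 49) < 8) := by omega
      exact if_neg hcond
    rw [ha, hb]

lemma cb_nonpair (coords : String) (h : ∀ c r : Char, coords.toList ≠ [c, r]) :
    coords_to_bitindex coords = coords_to_bitindex_alt coords := by
  have ha : coords_to_bitindex coords = none := by
    apply cbLoop_eq_none
    intro p hp
    fin_cases hp <;>
      (intro hEq
       have ht := (congrArg String.toList hEq).symm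
       simp at ht
       exact h _ _ ht)
  have hb : coords_to_bitindex_alt coords = none := by
    unfold coords_to_bitindex_alt
    rcases hl : coords.toList with _ | ⟨a, _ | ⟨b, _ | ⟨d, rest⟩⟩⟩
    · rfl
    · rfl
    · exact absurd hl (h a b)
    · rfl
  rw [ha, hb]

-- ===== VERDICT (by name: the statement is the Claim_ definition above) =====
theorem coords_to_bitindex_spec : Claim_equal_coords_to_bitindex := by
  intro coords _
  unfold Spec_coords_to_bitindex
  rcases hl : coords.toList with _ | ⟨a, _ | ⟨b, _ | ⟨d, rest⟩⟩⟩
  · exact cb_nonpair coords (by intro c r hcr; rw [hl] at hcr; exact absurd hcr (by simp))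
  · exact cb_nonpair coords (by intro c r hcr; rw [hl] at hcr; exact absurd hcr (by simp))
  · exact cb_pair coords a b hl
  · exact cb_nonpair coords (by intro c r hcr; rw [hl] at hcr; simp at hcr)
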